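-- pv_equiv track=rewrite | github.com/ryanc3412/MFE-6950 | api/categorize.py | fallback_categories
-- ===== SOURCE A (Python) =====
-- from typing import Sequence
--
-- def display_from_slug(slug: str) -> str:
--     """Title-case each word; preserve ' - ' segments (e.g. Car - Other)."""
--     s = (slug or "").strip()
--     if not s:
--         return "Other"
--     if " - " in s:
--         return " - ".join(display_from_slug(p.strip()) for p in s.split(" - "))
--     return " ".join(p.capitalize() for p in s.split())
--
-- def _fallback_slug(description: str, bank_category: str) -> str:
--     bc = (bank_category or "").strip().lower()
--     desc = (description or "").lower()
--     bank_map = {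
--         "groceries": "groceries",
--         "eating out": "eating out",
--         "gas": "gas",
--         "phone": "phone",
--         "church": "church",
--         "housing": "housing",
--         "personal": "personal",
--         "work": "other",
--         "subscription": "subscription",
--         "vacation": "vacation",
--     }
--     if bc in bank_map:
--         return bank_map[bc]
--     if "payroll" in desc or "pay roll" in desc:
--         return "other"
--     if "costco" in desc or "wal-mart" in desc or "walmart" in desc or "grocery" in desc:
--         return "groceries"
--     if "chevron" in desc or "maverik" in desc or "shell " in desc:
--         return "gas"
--     if "donation" in desc or "church" in desc or "jesuschrist" in desc:
--         return "church"
--     if "mcdonald" in desc or "chick-fil" in desc or "raising cane" in desc or "caesars" in desc: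
--         return "eating out"
--     if "visible" in desc or "verizon" in desc or "at&t" in desc or "t-mobile" in desc:
--         return "phone"
--     if "peacock" in desc or "netflix" in desc or "spotify" in desc:
--         return "subscription"
--     return "other"
--
-- def fallback_categories(
--     descriptions: Sequence[str], bank_categories: Sequence[str]
-- ) -> list[str]:
--     out: list[str] = []
--     for i, d in enumerate(descriptions):
--         bc = bank_categories[i] if i < len(bank_categories) else ""
--         slug = _fallback_slug(d, bc)
--         out.append(display_from_slug(slug))
--     return out
-- ===== SOURCE B (Python) =====
-- # Inverted-loop rewrite: instead of classifying each item with an if-chain and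
-- # then title-casing its slug, B makes keyword-major sweeps over a slot array
-- # (bank lookup fills slots first, then each (label, keyword) pair in priority
-- # order fills the still-empty slots whose description contains the keyword),
-- # with display labels precomputed in the tables.
--
-- _BANK = {
--     "groceries": "Groceries",
--     "eating out": "Eating Out",
--     "gas": "Gas",
--     "phone": "Phone",
--     "church": "Church",
--     "housing": "Housing",
--     "personal": "Personal",
--     "work": "Other",
--     "subscription": "Subscription",
--     "vacation": "Vacation",
-- }
--
-- _RULES = [
--     ("Other", ("payroll", "pay roll")),
--     ("Groceries", ("costco", "wal-mart", "walmart", "grocery")),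
--     ("Gas", ("chevron", "maverik", "shell ")),
--     ("Church", ("donation", "church", "jesuschrist")),
--     ("Eating Out", ("mcdonald", "chick-fil", "raising cane", "caesars")),
--     ("Phone", ("visible", "verizon", "at&t", "t-mobile")),
--     ("Subscription", ("peacock", "netflix", "spotify")),
-- ]
--
-- def fallback_categories(descriptions, bank_categories):
--     descs = [d.lower() for d in descriptions]
--     slots = [
--         _BANK.get((bank_categories[i] if i < len(bank_categories) else "").strip().lower())
--         for i in range(len(descriptions))
--     ]
--     for label, keys in _RULES:
--         for key in keys:
--             slots = [label if s is None and key in d else s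
--                      for s, d in zip(slots, descs)]
--     return [s if s is not None else "Other" for s in slots]
-- ===== Notes on version B (the rewrite author's own statement) =====
-- stated objective: alternative
-- what changed: Inverts the loop nesting: instead of classifying each item with a per-item if-chain and recursively title-casing its slug, B pre-fills a slot array from the bank-category table and then makes keyword-major sweeps (one pass over all items per (label, keyword) pair in priority order) that fill still-empty slots, with display labels precomputed in the tables.
import Mathlib
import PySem

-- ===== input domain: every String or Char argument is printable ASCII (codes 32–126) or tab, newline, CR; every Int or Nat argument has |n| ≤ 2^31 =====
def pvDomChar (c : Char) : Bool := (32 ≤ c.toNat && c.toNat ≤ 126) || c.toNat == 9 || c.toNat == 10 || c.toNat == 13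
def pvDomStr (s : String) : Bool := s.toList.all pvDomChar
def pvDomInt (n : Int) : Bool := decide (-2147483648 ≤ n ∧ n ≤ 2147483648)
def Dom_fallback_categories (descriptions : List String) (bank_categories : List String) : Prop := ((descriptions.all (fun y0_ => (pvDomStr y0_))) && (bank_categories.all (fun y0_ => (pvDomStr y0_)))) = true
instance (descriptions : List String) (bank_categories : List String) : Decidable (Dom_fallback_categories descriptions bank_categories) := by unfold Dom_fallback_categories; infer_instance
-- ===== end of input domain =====

-- B inverts the loops: a slot array is pre-filled from the bank table, then each
-- (label, keyword) pair in priority order sweeps once over all items filling the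
-- still-empty slots; display labels are precomputed in the tables. Return values
-- only; neither version mutates its arguments.

-- ===== PORT A =====

-- str.capitalize(): first char uppercased, rest lowered (exact on ASCII)
def pyCapitalize (s : String) : String :=
  match s.toList with
  | [] => ""
  | c :: cs => String.ofList (PySem.Chars.upperChar c :: PySem.Chars.lower cs)

-- display_from_slug is recursive in Python; fuel (= string length + 1, enough since
-- split parts are strictly shorter) only makes the same recursion total.
def display_go : Nat → String → String
  | 0, _ => "Other"
  | fuel+1, slug =>
    let s := PySem.Str.strip slug
    if s = "" then "Other"
    else if PySem.Str.isIn " - " s then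
      PySem.Str.join " - " ((PySem.Chars.splitOn s.toList " - ".toList).map (fun p => display_go fuel (PySem.Str.strip (String.ofList p))))
    else
      PySem.Str.join " " ((PySem.Str.split₀ s).map pyCapitalize)

def display_from_slug (slug : String) : String := display_go (slug.toList.length + 1) slug

def bankMap : PySem.Dict String String := PySem.Dict.mk
  [("groceries","groceries"), ("eating out","eating out"), ("gas","gas"),
   ("phone","phone"), ("church","church"), ("housing","housing"),
   ("personal","personal"), ("work","other"), ("subscription","subscription"),
   ("vacation","vacation")]

def fallbackSlug (description : String) (bank_category : String) : String :=
  -- bc, desc (Python locals) written inline; '(x or "")' on a str is x itself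
  match bankMap.get? (PySem.Str.lower (PySem.Str.strip bank_category)) with
  | some v => v
  | none =>
    if PySem.Str.isIn "payroll" (PySem.Str.lower description) || PySem.Str.isIn "pay roll" (PySem.Str.lower description) then "other"
    else if PySem.Str.isIn "costco" (PySem.Str.lower description) || PySem.Str.isIn "wal-mart" (PySem.Str.lower description) || PySem.Str.isIn "walmart" (PySem.Str.lower description) || PySem.Str.isIn "grocery" (PySem.Str.lower description) then "groceries"
    else if PySem.Str.isIn "chevron" (PySem.Str.lower description) || PySem.Str.isIn "maverik" (PySem.Str.lower description) || PySem.Str.isIn "shell " (PySem.Str.lower description) then "gas"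
    else if PySem.Str.isIn "donation" (PySem.Str.lower description) || PySem.Str.isIn "church" (PySem.Str.lower description) || PySem.Str.isIn "jesuschrist" (PySem.Str.lower description) then "church"
    else if PySem.Str.isIn "mcdonald" (PySem.Str.lower description) || PySem.Str.isIn "chick-fil" (PySem.Str.lower description) || PySem.Str.isIn "raising cane" (PySem.Str.lower description) || PySem.Str.isIn "caesars" (PySem.Str.lower description) then "eating out"
    else if PySem.Str.isIn "visible" (PySem.Str.lower description) || PySem.Str.isIn "verizon" (PySem.Str.lower description) || PySem.Str.isIn "at&t" (PySem.Str.lower description) || PySem.Str.isIn "t-mobile" (PySem.Str.lower description) then "phone"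
    else if PySem.Str.isIn "peacock" (PySem.Str.lower description) || PySem.Str.isIn "netflix" (PySem.Str.lower description) || PySem.Str.isIn "spotify" (PySem.Str.lower description) then "subscription"
    else "other"

def fcGo (bank_categories : List String) : Nat → List String → List String → List String
  | _, out, [] => out
  | i, out, d :: rest =>
    let bc := if i < bank_categories.length then bank_categories.getD i "" else ""
    fcGo bank_categories (i+1) (out ++ [display_from_slug (fallbackSlug d bc)]) rest

def fallback_categories (descriptions : List String) (bank_categories : List String) : List String :=
  fcGo bank_categories 0 [] descriptions

-- ===== PORT B =====

def bankTable : PySem.Dict String String := PySem.Dict.mk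
  [("groceries","Groceries"), ("eating out","Eating Out"), ("gas","Gas"),
   ("phone","Phone"), ("church","Church"), ("housing","Housing"),
   ("personal","Personal"), ("work","Other"), ("subscription","Subscription"),
   ("vacation","Vacation")]

def rulesTable : List (String × List String) :=
  [("Other", ["payroll", "pay roll"]),
   ("Groceries", ["costco", "wal-mart", "walmart", "grocery"]),
   ("Gas", ["chevron", "maverik", "shell "]),
   ("Church", ["donation", "church", "jesuschrist"]),
   ("Eating Out", ["mcdonald", "chick-fil", "raising cane", "caesars"]),
   ("Phone", ["visible", "verizon", "at&t", "t-mobile"]),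
   ("Subscription", ["peacock", "netflix", "spotify"])]

-- one keyword-major sweep: the inner list comprehension of Source B
def sweepB (lab key : String) (descs : List String) (slots : List (Option String)) : List (Option String) :=
  (slots.zip descs).map (fun q => if q.1.isNone && PySem.Str.isIn key q.2 then some lab else q.1)

def fallback_categories_alt (descriptions : List String) (bank_categories : List String) : List String :=
  let descs := descriptions.map PySem.Str.lower
  let slots0 := (List.range descriptions.length).map (fun i =>
    bankTable.get? (PySem.Str.lower (PySem.Str.strip
      (if i < bank_categories.length then bank_categories.getD i "" else ""))))
  let slots := rulesTable.foldl (fun sl r => r.2.foldl (fun sl k => sweepB r.1 k descs sl) sl) slots0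
  slots.map (fun s => s.getD "Other")

-- ===== PRECONDITION & SPEC =====
def Spec_fallback_categories (descriptions : List String) (bank_categories : List String) (out : List String) : Prop := out = fallback_categories_alt descriptions bank_categories
instance (descriptions : List String) (bank_categories : List String) (out : List String) : Decidable (Spec_fallback_categories descriptions bank_categories out) := by unfold Spec_fallback_categories; infer_instance

-- ===== CLAIM (what is proved, stated in full; the proofs are below) =====
def Claim_equal_fallback_categories : Prop := ∀ (descriptions : List String) (bank_categories : List String), Dom_fallback_categories descriptions bank_categories → Spec_fallback_categories descriptions bank_categories (fallback_categories descriptions bank_categories)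

-- ===== LEMMAS AND PROOFS =====

-- first-match semantics of the per-item rule scan (characterisation of A's chain)
def rulesGo : List (String × List String) → String → String
  | [], _ => "Other"
  | (lab, keys) :: rest, desc =>
    if keys.any (fun k => PySem.Str.isIn k desc) then lab else rulesGo rest desc

-- the per-item residue of B's sweeps: fold the rule table over one slot
def genFold (rs : List (String × List String)) (desc : String) (o : Option String) : Option String :=
  rs.foldl (fun o r => r.2.foldl (fun o k => if o.isNone && PySem.Str.isIn k desc then some r.1 else o) o) o

def flatPairs : List (String × String) :=
  rulesTable.flatMap (fun r => r.2.map (fun k => (r.1, k)))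

set_option maxHeartbeats 1600000 in
theorem dict_rel (x : String) : bankTable.get? x = Option.map display_from_slug (bankMap.get? x) := by
  unfold bankTable bankMap
  simp only [PySem.Dict.get?_mk_cons]
  split_ifs <;> simp only [PySem.Dict.get?, List.find?_nil, Option.map_none, Option.map_some, Option.some.injEq] <;> decide

set_option maxHeartbeats 1600000 in
theorem chain_eq (desc : String) :
    display_from_slug (
      if PySem.Str.isIn "payroll" desc || PySem.Str.isIn "pay roll" desc then "other"
      else if PySem.Str.isIn "costco" desc || PySem.Str.isIn "wal-mart" desc || PySem.Str.isIn "walmart" desc || PySem.Str.isIn "grocery" desc then "groceries"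
      else if PySem.Str.isIn "chevron" desc || PySem.Str.isIn "maverik" desc || PySem.Str.isIn "shell " desc then "gas"
      else if PySem.Str.isIn "donation" desc || PySem.Str.isIn "church" desc || PySem.Str.isIn "jesuschrist" desc then "church"
      else if PySem.Str.isIn "mcdonald" desc || PySem.Str.isIn "chick-fil" desc || PySem.Str.isIn "raising cane" desc || PySem.Str.isIn "caesars" desc then "eating out"
      else if PySem.Str.isIn "visible" desc || PySem.Str.isIn "verizon" desc || PySem.Str.isIn "at&t" desc || PySem.Str.isIn "t-mobile" desc then "phone"
      else if PySem.Str.isIn "peacock" desc || PySem.Str.isIn "netflix" desc || PySem.Str.isIn "spotify" desc then "subscription"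
      else "other") = rulesGo rulesTable desc := by
  simp only [rulesGo, rulesTable, List.any_cons, List.any_nil, Bool.or_false, Bool.or_assoc]
  split_ifs <;> decide

theorem keysFold (lab desc : String) : ∀ (keys : List String) (o : Option String),
    keys.foldl (fun o k => if o.isNone && PySem.Str.isIn k desc then some lab else o) o
      = if o.isNone && keys.any (fun k => PySem.Str.isIn k desc) then some lab else o := by
  intro keys
  induction keys with
  | nil => intro o; simp
  | cons k ks ih =>
    intro o
    rw [List.foldl_cons, ih]
    cases o with
    | some v => simp
    | none =>
      by_cases h : PySem.Str.isIn k desc = true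
      · simp [PySem.Str.isIn] at h
        simp [h]
      · simp only [Bool.not_eq_true] at h
        simp [PySem.Str.isIn] at h
        simp [h]

theorem genFold_some (desc v : String) : ∀ (rs : List (String × List String)),
    genFold rs desc (some v) = some v := by
  intro rs
  induction rs with
  | nil => rfl
  | cons r rest ih =>
    unfold genFold at ih ⊢
    rw [List.foldl_cons, keysFold]
    simp only [Option.isNone_some, Bool.false_and, Bool.false_eq_true, if_false]
    exact ih

theorem genFold_none (desc : String) : ∀ (rs : List (String × List String)),
    (genFold rs desc none).getD "Other" = rulesGo rs desc := by
  intro rs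
  induction rs with
  | nil => rfl
  | cons r rest ih =>
    rcases r with ⟨lab, keys⟩
    unfold genFold at ih ⊢
    rw [List.foldl_cons, keysFold]
    simp only [Option.isNone_none, Bool.true_and, rulesGo]
    by_cases h : keys.any (fun k => PySem.Str.isIn k desc) = true
    · rw [if_pos h, if_pos h]
      have hs := genFold_some desc lab rest
      unfold genFold at hs
      rw [hs]
      rfl
    · rw [if_neg h, if_neg h]
      exact ih

theorem pointwise (d bc : String) :
    display_from_slug (fallbackSlug d bc)
      = (genFold rulesTable (PySem.Str.lower d)
          (bankTable.get? (PySem.Str.lower (PySem.Str.strip bc)))).getD "Other" := by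
  unfold fallbackSlug
  rw [dict_rel]
  rcases hx : bankMap.get? (PySem.Str.lower (PySem.Str.strip bc)) with _ | v
  · simp only [Option.map_none]
    rw [genFold_none]
    exact chain_eq (PySem.Str.lower d)
  · simp only [Option.map_some, genFold_some, Option.getD_some]

theorem zip_map_zip {α β γ : Type} : ∀ (sl : List α) (ds : List β) (g : α × β → γ),
    ((sl.zip ds).map g).zip ds = (sl.zip ds).map (fun q => (g q, q.2)) := by
  intro sl
  induction sl with
  | nil => intro ds g; simp
  | cons a sl ih =>
    intro ds g
    cases ds with
    | nil => simp
    | cons b ds => simp [ih]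

theorem flat_comm : ∀ (ps : List (String × String)) (ds : List String) (sl : List (Option String)),
    sl.length = ds.length →
    ps.foldl (fun sl p => sweepB p.1 p.2 ds sl) sl
      = (sl.zip ds).map (fun q =>
          ps.foldl (fun o p => if o.isNone && PySem.Str.isIn p.2 q.2 then some p.1 else o) q.1) := by
  intro ps
  induction ps with
  | nil =>
    intro ds sl h
    simp only [List.foldl_nil]
    have := List.map_fst_zip (l₁ := sl) (l₂ := ds) (le_of_eq h)
    simpa using this.symm
  | cons p ps ih =>
    intro ds sl h
    simp only [List.foldl_cons]
    rw [ih ds (sweepB p.1 p.2 ds sl) (by simp [sweepB, h])]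
    unfold sweepB
    rw [zip_map_zip]
    simp only [List.map_map]
    rfl

theorem nested_flat {σ : Type} (f : σ → String × String → σ) : ∀ (rs : List (String × List String)) (s : σ),
    rs.foldl (fun s r => r.2.foldl (fun s k => f s (r.1, k)) s) s
      = (rs.flatMap (fun r => r.2.map (fun k => (r.1, k)))).foldl f s := by
  intro rs
  induction rs with
  | nil => intro s; simp
  | cons r rest ih => intro s; simp [List.foldl_append, List.foldl_map, ih]

theorem nested_eq_flat (descs : List String) (slots0 : List (Option String)) :
    rulesTable.foldl (fun sl r => r.2.foldl (fun sl k => sweepB r.1 k descs sl) sl) slots0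
      = flatPairs.foldl (fun sl p => sweepB p.1 p.2 descs sl) slots0 :=
  nested_flat (fun sl p => sweepB p.1 p.2 descs sl) rulesTable slots0

theorem perItem_flat (desc : String) (o : Option String) :
    flatPairs.foldl (fun o p => if o.isNone && PySem.Str.isIn p.2 desc then some p.1 else o) o
      = genFold rulesTable desc o :=
  (nested_flat (fun o p => if o.isNone && PySem.Str.isIn p.2 desc then some p.1 else o) rulesTable o).symm

theorem zip_pad : ∀ (l t : List String) (n : Nat), l.length ≤ n →
    l.zip (t ++ List.replicate (n+1) "") = l.zip (t ++ List.replicate n "")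
  | [], _, _, _ => by simp
  | a :: l, b :: t, n, h => by
    simp only [List.cons_append, List.zip_cons_cons, List.cons.injEq, true_and]
    exact zip_pad l t n (by simp at h; omega)
  | a :: l, [], n, h => by
    match n, h with
    | n+1, h =>
      simp only [List.nil_append, List.replicate_succ, List.zip_cons_cons, List.cons.injEq, true_and]
      exact zip_pad l [] n (by simpa using h)

theorem fcGo_eq : ∀ (ds bcs out : List String) (i : Nat),
    fcGo bcs i out ds = out ++ (ds.zip (bcs.drop i ++ List.replicate ds.length "")).map
      (fun p => display_from_slug (fallbackSlug p.1 p.2)) := by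
  intro ds
  induction ds with
  | nil => intro bcs out i; simp [fcGo]
  | cons d rest ih =>
    intro bcs out i
    rw [fcGo, ih]
    by_cases h : i < bcs.length
    · rw [List.drop_eq_getElem_cons h]
      have hbc : (if i < bcs.length then bcs.getD i "" else "") = bcs[i] := by
        simp [h, List.getD_eq_getElem?_getD]
      rw [hbc]
      simp only [List.length_cons, List.cons_append, List.zip_cons_cons, List.map_cons,
        List.append_assoc, List.nil_append]
      rw [zip_pad rest (bcs.drop (i+1)) rest.length (le_refl _)]
    · have hd : bcs.drop i = [] := List.drop_eq_nil_of_le (Nat.le_of_not_lt h)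
      have hd' : bcs.drop (i+1) = [] := List.drop_eq_nil_of_le (by omega)
      rw [hd, hd']
      simp only [h, if_false, List.length_cons, List.nil_append, List.replicate_succ,
        List.zip_cons_cons, List.map_cons, List.append_assoc, List.singleton_append]

-- ===== VERDICT (by name: the statement is the Claim_ definition above) =====
set_option maxHeartbeats 1600000 in
theorem fallback_categories_spec : Claim_equal_fallback_categories := by
  intro ds bcs _
  show fallback_categories ds bcs = fallback_categories_alt ds bcs
  simp only [fallback_categories, fallback_categories_alt]
  rw [fcGo_eq]
  simp only [List.nil_append, List.drop_zero]
  rw [nested_eq_flat, flat_comm _ _ _ (by simp), List.map_map]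
  apply List.ext_getElem
  · simp
  · intro i h1 h2
    simp only [List.getElem_map, List.getElem_zip, List.getElem_range, Function.comp_apply,
      perItem_flat]
    rw [pointwise]
    have hi : i < (bcs ++ List.replicate ds.length "").length := by
      simp only [List.length_append, List.length_replicate]
      have : i < ds.length := by simpa using h1
      omega
    have harg : (if i < bcs.length then bcs.getD i "" else "")
        = (bcs ++ List.replicate ds.length "")[i]'hi := by
      by_cases hb : i < bcs.length
      · rw [List.getElem_append_left hb]
        simp [hb, List.getD_eq_getElem?_getD]
      · rw [List.getElem_append_right (Nat.le_of_not_lt hb)]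
        simp [hb]
    rw [harg]
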